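-- pv_equiv track=rewrite | github.com/bitranox/lib_layered_config | tests/adapters/test_dotenv_loader.py | _no_prefix
-- ===== SOURCE A (Python) =====
-- def _no_prefix(paths):
--     seen = []
--     for parts in paths:
--         for existing in seen:
--             if parts[: len(existing)] == existing or existing[: len(parts)] == parts:
--                 return False
--         seen.append(parts)
--     return True
-- ===== SOURCE B (Python) =====
-- def _no_prefix(paths):
--     index = set()
--     for parts in paths:
--         t = tuple(parts)
--         if t in index:
--             return False
--         index.add(t)
--     return not any(
--         tuple(parts[:k]) in index
--         for parts in paths
--         for k in range(len(parts))
--     )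
-- ===== Notes on version B (the rewrite author's own statement) =====
-- stated objective: alternative
-- what changed: Replaces the incremental all-pairs scan with two independent passes: a set-building duplicate check, then a set-membership test of every proper prefix of every path.
import Mathlib
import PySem

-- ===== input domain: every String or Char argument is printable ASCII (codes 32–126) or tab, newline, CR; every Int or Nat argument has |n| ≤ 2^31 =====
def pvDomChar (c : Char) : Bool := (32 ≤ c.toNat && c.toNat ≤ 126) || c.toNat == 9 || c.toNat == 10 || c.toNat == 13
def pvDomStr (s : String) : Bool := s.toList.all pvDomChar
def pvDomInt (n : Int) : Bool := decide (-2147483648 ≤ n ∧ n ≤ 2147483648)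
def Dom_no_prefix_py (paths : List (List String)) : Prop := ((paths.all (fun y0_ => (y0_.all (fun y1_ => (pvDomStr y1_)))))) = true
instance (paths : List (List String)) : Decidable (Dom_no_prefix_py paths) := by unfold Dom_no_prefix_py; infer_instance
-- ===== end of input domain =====

-- B replaces A's incremental all-pairs scan by a duplicate check plus a set lookup of every proper prefix (alternative algorithm, same measured cost).

-- ===== PORT A =====
-- the inner 'for existing in seen: if …: return False' is 'seen.any …';
-- 'parts[: len(existing)]' with a nonnegative bound is exactly 'List.take'
def noPrefixLoop (seen : List (List String)) : List (List String) → Bool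
  | [] => true
  | parts :: rest =>
    if seen.any (fun existing =>
        parts.take existing.length == existing || existing.take parts.length == parts)
    then false
    else noPrefixLoop (seen ++ [parts]) rest

def no_prefix_py (paths : List (List String)) : Bool := noPrefixLoop [] paths

-- ===== PORT B =====
-- first loop of Source B: build the set, 'return False' (= none) on a duplicate
def dupLoop (index : PySem.Set (List String)) : List (List String) → Option (PySem.Set (List String))
  | [] => some index
  | parts :: rest =>
    if PySem.Set.contains index parts
    then none
    else dupLoop (PySem.Set.add index parts) rest

-- 'not any(tuple(parts[:k]) in index for parts in paths for k in range(len(parts)))'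
def no_prefix_py_alt (paths : List (List String)) : Bool :=
  match dupLoop PySem.Set.empty paths with
  | none => false
  | some index =>
    !(paths.any fun parts =>
        (List.range parts.length).any fun k => PySem.Set.contains index (parts.take k))

-- ===== PRECONDITION & SPEC =====
def Spec_no_prefix_py (paths : List (List String)) (out : Bool) : Prop := out = no_prefix_py_alt paths
instance (paths : List (List String)) (out : Bool) : Decidable (Spec_no_prefix_py paths out) := by unfold Spec_no_prefix_py; infer_instance

-- ===== CLAIM (what is proved, stated in full; the proofs are below) =====
def Claim_equal_no_prefix_py : Prop := ∀ (paths : List (List String)), Dom_no_prefix_py paths → Spec_no_prefix_py paths (no_prefix_py paths)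

-- ===== LEMMAS AND PROOFS =====

-- the symmetric relation A tests between a new path and an already-seen one
def pvRel (a b : List String) : Bool :=
  a.take b.length == b || b.take a.length == a

theorem pvRel_comm (a b : List String) : pvRel a b = pvRel b a := by
  simp [pvRel, Bool.or_comm]

theorem pvRel_self (a : List String) : pvRel a a = true := by
  simp [pvRel]

theorem noPrefixLoop_eq_true_iff (rest seen : List (List String)) :
    noPrefixLoop seen rest = true ↔
      rest.Pairwise (fun x y => pvRel x y = false) ∧
        ∀ x ∈ seen, ∀ y ∈ rest, pvRel y x = false := by
  induction rest generalizing seen with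
  | nil => simp [noPrefixLoop]
  | cons parts rest ih =>
    by_cases h : seen.any (fun existing =>
        parts.take existing.length == existing || existing.take parts.length == parts) = true
    · rw [show noPrefixLoop seen (parts :: rest) = false by simp [noPrefixLoop, h]]
      constructor
      · intro hh; exact absurd hh (by simp)
      · rintro ⟨-, h2⟩
        rcases List.any_eq_true.mp h with ⟨x, hx, hrel⟩
        have := h2 x hx parts (by simp)
        rw [show pvRel parts x = true from hrel] at this
        exact absurd this (by simp)
    · rw [show noPrefixLoop seen (parts :: rest) = noPrefixLoop (seen ++ [parts]) rest by
        simp [noPrefixLoop, h], ih]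
      constructor
      · rintro ⟨hp, hs⟩
        refine ⟨List.pairwise_cons.mpr ⟨?_, hp⟩, ?_⟩
        · intro y hy
          have := hs parts (by simp) y hy
          rw [pvRel_comm]; exact this
        · intro x hx y hy
          rcases List.mem_cons.mp hy with heq | hy'
          · subst heq
            by_contra hne
            have hpt : pvRel y x = true := by
              cases hrx : pvRel y x with
              | true => rfl
              | false => exact absurd hrx hne
            exact h (List.any_eq_true.mpr ⟨x, hx, by rw [pvRel] at hpt; exact hpt⟩)
          · exact hs x (by simp [hx]) y hy'
      · rintro ⟨hp, hs⟩
        rcases List.pairwise_cons.mp hp with ⟨h1, h2⟩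
        refine ⟨h2, ?_⟩
        intro x hx y hy
        rcases List.mem_append.mp hx with hx | hx
        · exact hs x hx y (by simp [hy])
        · have hxp : x = parts := by simpa using hx
          subst hxp
          rw [pvRel_comm]; exact h1 y hy

theorem dupLoop_some_iff (rest index : List (List String)) :
    (dupLoop index rest).isSome = true ↔
      rest.Nodup ∧ ∀ x ∈ rest, x ∉ index := by
  induction rest generalizing index with
  | nil => simp [dupLoop]
  | cons parts rest ih =>
    by_cases h : parts ∈ index
    · simp [dupLoop, PySem.Set.contains, h]
    · simp only [dupLoop, PySem.Set.contains,
        (by simpa using h : index.contains parts = false), Bool.false_eq_true,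
        if_false, ih, List.nodup_cons, List.mem_cons]
      constructor
      · rintro ⟨hn, hni⟩
        refine ⟨⟨?_, hn⟩, ?_⟩
        · intro hmem
          have := hni parts hmem
          simp [PySem.Set.add, PySem.Set.contains, h] at this
        · rintro x (rfl | hx)
          · exact h
          · have := hni x hx
            simp only [PySem.Set.add, PySem.Set.contains,
              (by simpa using h : index.contains parts = false), Bool.false_eq_true, if_false,
              List.mem_append, List.mem_singleton, not_or] at this
            exact this.1
      · rintro ⟨⟨hnp, hn⟩, hni⟩
        refine ⟨hn, ?_⟩
        intro x hx
        simp only [PySem.Set.add, PySem.Set.contains,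
          (by simpa using h : index.contains parts = false), Bool.false_eq_true, if_false,
          List.mem_append, List.mem_singleton]
        rintro (hxi | rfl)
        · exact hni x (Or.inr hx) hxi
        · exact hnp hx

theorem dupLoop_mem (rest index idx : List (List String))
    (h : dupLoop index rest = some idx) :
    ∀ x, x ∈ idx ↔ x ∈ index ∨ x ∈ rest := by
  induction rest generalizing index with
  | nil =>
    intro x
    simp only [dupLoop, Option.some.injEq] at h
    subst h; simp
  | cons parts rest ih =>
    intro x
    by_cases hc : parts ∈ index
    · simp [dupLoop, PySem.Set.contains, hc] at h
    · simp only [dupLoop, PySem.Set.contains,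
        (by simpa using hc : index.contains parts = false), Bool.false_eq_true, if_false] at h
      have := ih _ h x
      simp only [PySem.Set.add, PySem.Set.contains,
        (by simpa using hc : index.contains parts = false), Bool.false_eq_true, if_false,
        List.mem_append, List.mem_singleton] at this
      rw [this]
      simp [List.mem_cons]
      tauto

-- the common pair-free characterisation
theorem pairwise_iff_nodup_and_prefixfree (paths : List (List String)) :
    paths.Pairwise (fun x y => pvRel x y = false) ↔
      (paths.Nodup ∧ ∀ p ∈ paths, ∀ k < p.length, p.take k ∉ paths) := by
  constructor
  · intro hp
    have hsym : Symmetric (fun x y : List String => pvRel x y = false) := by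
      intro a b h; rw [pvRel_comm]; exact h
    refine ⟨hp.imp_of_mem ?_, ?_⟩
    · intro a b _ _ hr heq
      subst heq
      rw [pvRel_self] at hr; exact absurd hr (by simp)
    · intro p hpmem k hk hq
      have hne : p.take k ≠ p := by
        intro he
        have := congrArg List.length he
        simp [List.length_take] at this
        omega
      have hr := hp.forall hsym hpmem hq (Ne.symm hne)
      -- but pvRel p (p.take k) = true since (p.take k) is a prefix of p
      have : pvRel p (p.take k) = true := by simp [pvRel]
      rw [this] at hr; exact absurd hr (by simp)
  · rintro ⟨hnd, hpf⟩
    refine hnd.imp_of_mem ?_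
    intro a b ha hb hne
    cases hr : pvRel a b with
    | false => rfl
    | true =>
      exfalso
      have hr' : a.take b.length = b ∨ b.take a.length = a := by simpa [pvRel] using hr
      rcases hr' with hb' | ha'
      · -- b = a.take b.length : b is a prefix of a
        have hlt : b.length < a.length := by
          rcases lt_or_ge b.length a.length with h | h
          · exact h
          · exfalso; apply hne
            rw [← hb', List.take_of_length_le h]
        exact hpf a ha b.length hlt (by rw [hb']; exact hb)
      · have hlt : a.length < b.length := by
          rcases lt_or_ge a.length b.length with h | h
          · exact h
          · exfalso; apply hne
            rw [← ha', List.take_of_length_le h]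
        exact hpf b hb a.length hlt (by rw [ha']; exact ha)

theorem alt_eq_true_iff (paths : List (List String)) :
    no_prefix_py_alt paths = true ↔
      (paths.Nodup ∧ ∀ p ∈ paths, ∀ k < p.length, p.take k ∉ paths) := by
  unfold no_prefix_py_alt
  cases hdl : dupLoop PySem.Set.empty paths with
  | none =>
    simp only [Bool.false_eq_true, false_iff]
    rintro ⟨hnd, -⟩
    have := (dupLoop_some_iff paths PySem.Set.empty).mpr ⟨hnd, by simp [PySem.Set.empty]⟩
    rw [hdl] at this; simp at this
  | some index =>
    have hnd := (dupLoop_some_iff paths PySem.Set.empty).mp (by rw [hdl]; rfl)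
    have hmem := dupLoop_mem paths PySem.Set.empty index hdl
    simp only [PySem.Set.empty, List.not_mem_nil, false_or] at hmem
    constructor
    · intro h
      refine ⟨hnd.1, ?_⟩
      intro p hp k hk hq
      rw [Bool.not_eq_true'] at h
      have h2 := eq_false_of_ne_true (List.any_eq_false.mp h p hp)
      have h3 := List.any_eq_false.mp h2 k (List.mem_range.mpr hk)
      have h4 : PySem.Set.contains index (p.take k) = true := by
        simp only [PySem.Set.contains]
        simpa using (hmem (p.take k)).mpr hq
      exact h3 h4
    · rintro ⟨-, hpf⟩
      rw [Bool.not_eq_true']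
      apply List.any_eq_false.mpr
      intro p hp hcon
      rcases List.any_eq_true.mp hcon with ⟨k, hkr, hc⟩
      have hk := List.mem_range.mp hkr
      have hcm : p.take k ∈ index := by simpa [PySem.Set.contains] using hc
      exact hpf p hp k hk ((hmem (p.take k)).mp hcm)

-- ===== VERDICT (by name: the statement is the Claim_ definition above) =====
theorem no_prefix_py_spec : Claim_equal_no_prefix_py := by
  intro paths _
  unfold Spec_no_prefix_py
  apply Bool.coe_iff_coe.mp
  rw [show no_prefix_py paths = noPrefixLoop [] paths from rfl,
    noPrefixLoop_eq_true_iff, alt_eq_true_iff, ← pairwise_iff_nodup_and_prefixfree]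
  simp
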